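-- pv_equiv track=rewrite | github.com/JLBMaritime/AIS-WiFi-Manager | app/wifi_manager.py | _split_nmcli_terse
-- ===== SOURCE A (Python) =====
-- def _split_nmcli_terse(line: str) -> list[str]:
--     """Split an nmcli ``-t`` line on ``:`` honouring ``\\:`` escapes."""
--     out: list[str] = []
--     cur = []
--     i = 0
--     while i < len(line):
--         c = line[i]
--         if c == "\\" and i + 1 < len(line) and line[i + 1] == ":":
--             cur.append(":")
--             i += 2
--             continue
--         if c == ":":
--             out.append("".join(cur))
--             cur = []
--             i += 1
--             continue
--         cur.append(c)
--         i += 1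
--     out.append("".join(cur))
--     return out
-- ===== SOURCE B (Python) =====
-- def _split_nmcli_terse(line: str) -> list[str]:
--     """Split an nmcli ``-t`` line on ``:`` honouring ``\\:`` escapes."""
--     out: list[str] = []
--     for f in line.split(":"):
--         if out and out[-1].endswith("\\"):
--             out[-1] = out[-1][:-1] + ":" + f
--         else:
--             out.append(f)
--     return out
-- ===== Notes on version B (the rewrite author's own statement) =====
-- stated objective: faster
-- what changed: Replaced the hand-written per-character index-advancing escape scanner with str.split on the colon separator followed by a single left-to-right pass that re-merges a field into its predecessor when that predecessor ends with a backslash (the escaped colon).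
import Mathlib
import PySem

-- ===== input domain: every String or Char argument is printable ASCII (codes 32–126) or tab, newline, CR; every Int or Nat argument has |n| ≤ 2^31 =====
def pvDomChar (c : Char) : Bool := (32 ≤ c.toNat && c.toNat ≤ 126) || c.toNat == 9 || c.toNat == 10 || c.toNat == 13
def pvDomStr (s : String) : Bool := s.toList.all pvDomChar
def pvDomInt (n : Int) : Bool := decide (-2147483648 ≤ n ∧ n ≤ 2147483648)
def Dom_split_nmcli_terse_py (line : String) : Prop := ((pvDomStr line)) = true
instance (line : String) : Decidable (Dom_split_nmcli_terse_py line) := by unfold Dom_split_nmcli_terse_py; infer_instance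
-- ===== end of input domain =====

-- B replaces A's index-advancing escape scanner by a plain split on ':' followed by a
-- left-to-right re-merge of fields whose predecessor ends in a backslash (objective: faster by a measured constant factor — the split runs in C).

-- ===== PORT A =====
-- A's while loop over the index i: the remaining suffix of the string is the list `rest`;
-- `c == "\\" and i + 1 < len(line) and line[i+1] == ":"` is `c = '\\' ∧ r.head? = some ':'`,
-- and `i += 2` is `r.tail`; `cur.append(x)` is `cur ++ [x]`, `"".join(cur)` is `String.ofList cur`.
def pvLoopA (rest cur : List Char) (out : List String) : List String :=
  match rest with
  | [] => out ++ [String.ofList cur]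
  | c :: r =>
    if c = '\\' ∧ r.head? = some ':' then pvLoopA r.tail (cur ++ [':']) out
    else if c = ':' then pvLoopA r [] (out ++ [String.ofList cur])
    else pvLoopA r (cur ++ [c]) out
termination_by rest.length
decreasing_by
  all_goals simp [List.length_tail]

def split_nmcli_terse_py (line : String) : List String :=
  pvLoopA line.toList [] []

-- ===== PORT B =====
-- one step of B's loop body: `if out and out[-1].endswith("\\")` — endswith with the
-- single-character suffix "\\" is a last-character test; `out[-1][:-1] + ":" + f` is
-- `dropLast ++ ':' :: f` ( s[:-1] = dropLast, exact also on the empty string ).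
def pvBStep (out : List (List Char)) (f : List Char) : List (List Char) :=
  if out ≠ [] ∧ (out.getLastD []).getLast? = some '\\' then
    out.dropLast ++ [(out.getLastD []).dropLast ++ ':' :: f]
  else out ++ [f]

-- `line.split(":")` for the one-character separator ":" is List.splitOn ':' on the characters
def split_nmcli_terse_py_alt (line : String) : List String :=
  (((line.toList.splitOn ':').foldl pvBStep []).map String.ofList)

-- ===== PRECONDITION & SPEC =====
def Spec_split_nmcli_terse_py (line : String) (out : List String) : Prop := out = split_nmcli_terse_py_alt line
instance (line : String) (out : List String) : Decidable (Spec_split_nmcli_terse_py line out) := by unfold Spec_split_nmcli_terse_py; infer_instance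

-- ===== CLAIM (what is proved, stated in full; the proofs are below) =====
def Claim_equal_split_nmcli_terse_py : Prop := ∀ (line : String), Dom_split_nmcli_terse_py line → Spec_split_nmcli_terse_py line (split_nmcli_terse_py line)

-- ===== LEMMAS AND PROOFS =====

-- proof-side restatement of B's merge as a recursion on the field list
def pvMergeP : List Char → List (List Char) → List (List Char)
  | f, [] => [f]
  | f, g :: gs =>
    if f.getLast? = some '\\' then pvMergeP (f.dropLast ++ ':' :: g) gs else f :: pvMergeP g gs

lemma pvFoldl_bStep (fs : List (List Char)) : ∀ (out : List (List Char)) (g : List Char),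
    (fs.foldl pvBStep (out ++ [g])) = out ++ pvMergeP g fs := by
  induction fs with
  | nil => intro out g; simp [pvMergeP]
  | cons f fs ih =>
    intro out g
    by_cases h : g.getLast? = some '\\'
    · have : pvBStep (out ++ [g]) f = out ++ [g.dropLast ++ ':' :: f] := by
        simp [pvBStep, h]
      simp only [List.foldl_cons, this, ih, pvMergeP, if_pos h]
    · have : pvBStep (out ++ [g]) f = (out ++ [g]) ++ [f] := by
        simp [pvBStep, h]
      simp only [List.foldl_cons, this, ih, pvMergeP, if_neg h]
      simp

lemma pvMain : ∀ (n : Nat) (l cur : List Char) (out : List String),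
    l.length ≤ n →
    (cur.getLast? = some '\\' → l.head? ≠ some ':') →
    ∀ g gs, l.splitOnP (· == ':') = g :: gs →
    pvLoopA l cur out = out ++ (pvMergeP (cur ++ g) gs).map String.ofList := by
  intro n
  induction n with
  | zero =>
    intro l cur out hlen _ g gs hsp
    have hl : l = [] := List.eq_nil_of_length_eq_zero (Nat.le_zero.mp hlen)
    subst hl
    rw [List.splitOnP_nil] at hsp
    cases hsp
    simp [pvLoopA, pvMergeP]
  | succ n ih =>
    intro l cur out hlen hcur g gs hsp
    cases l with
    | nil =>
      rw [List.splitOnP_nil] at hsp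
      cases hsp
      simp [pvLoopA, pvMergeP]
    | cons c r =>
      rw [pvLoopA]
      by_cases h1 : c = '\\' ∧ r.head? = some ':'
      · obtain ⟨rfl, hr⟩ := h1
        cases r with
        | nil => simp at hr
        | cons c2 r' =>
          have hc2 : c2 = ':' := by simpa using hr
          subst hc2
          rw [List.splitOnP_cons, List.splitOnP_cons] at hsp
          simp only [show (('\\' : Char) == ':') = false from rfl,
            show ((':' : Char) == ':') = true from rfl, if_true, if_false,
            Bool.false_eq_true, List.modifyHead] at hsp
          obtain ⟨g', gs', hr'⟩ := List.exists_cons_of_ne_nil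
            (List.splitOnP_ne_nil (· == ':') r')
          rw [hr'] at hsp
          obtain ⟨rfl, rfl⟩ := List.cons.injEq .. ▸ hsp
          simp only [List.tail_cons]
          rw [ih r' (cur ++ [':']) out (by simp at hlen ⊢; omega)
            (by simp) g' gs' hr']
          simp [pvMergeP]
      · by_cases h2 : c = ':'
        · subst h2
          rw [List.splitOnP_cons] at hsp
          simp only [show ((':' : Char) == ':') = true from rfl, if_true] at hsp
          obtain ⟨g', gs', hr'⟩ := List.exists_cons_of_ne_nil
            (List.splitOnP_ne_nil (· == ':') r)
          rw [hr'] at hsp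
          obtain ⟨rfl, rfl⟩ := List.cons.injEq .. ▸ hsp
          have hne : ¬ cur.getLast? = some '\\' := fun h => hcur h (by simp)
          simp only [if_neg h1]
          rw [ih r [] (out ++ [String.ofList cur]) (by simp at hlen ⊢; omega)
            (by simp) g' gs' hr']
          simp [pvMergeP, hne]
        · rw [List.splitOnP_cons] at hsp
          have hcc : (c == ':') = false := by simp [h2]
          rw [hcc] at hsp
          simp only [Bool.false_eq_true, if_false] at hsp
          obtain ⟨g', gs', hr'⟩ := List.exists_cons_of_ne_nil
            (List.splitOnP_ne_nil (· == ':') r)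
          rw [hr'] at hsp
          simp only [List.modifyHead] at hsp
          obtain ⟨rfl, rfl⟩ := List.cons.injEq .. ▸ hsp
          simp only [if_neg h1, if_neg h2]
          rw [ih r (cur ++ [c]) out (by simp at hlen ⊢; omega)
            (by intro hlast hhead
                have : c = '\\' := by simpa [List.getLast?_concat] using hlast
                exact h1 ⟨this, hhead⟩) g' gs' hr']
          simp

-- ===== VERDICT (by name: the statement is the Claim_ definition above) =====
theorem split_nmcli_terse_py_spec : Claim_equal_split_nmcli_terse_py := by
  intro line _
  unfold Spec_split_nmcli_terse_py split_nmcli_terse_py split_nmcli_terse_py_alt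
  obtain ⟨g, gs, hsp⟩ := List.exists_cons_of_ne_nil
    (List.splitOnP_ne_nil (· == ':') line.toList)
  have hA := pvMain line.toList.length line.toList [] [] le_rfl (by simp) g gs hsp
  have hB : (line.toList.splitOn ':').foldl pvBStep [] = pvMergeP g gs := by
    rw [List.splitOn, hsp]
    have h0 : pvBStep [] g = [] ++ [g] := by simp [pvBStep]
    simp only [List.foldl_cons, h0, pvFoldl_bStep]
    simp
  rw [hA, hB]
  simp
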